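-- pv_equiv track=rewrite | github.com/Lama-West/SPARQL_Query_Generation_aacl-ijcnl2022 | Data/src/classes/lcquad_dataset.py | untag_entry
-- ===== SOURCE A (Python) =====
-- from typing import Dict, List, Optional, Set, Tuple, cast, Union
--
-- def untag_entry(question: str, query: str) -> Tuple[str, Set[str]]:
--     tags = ['dbr:', 'dbo:', 'dbp:', 'dbc:']
--
--     question_words = question.split()
--     query_words = query.split()
--
--     kb_elems_qst = set([w for w in question_words if w[:4] in tags])
--     kb_elems_qry = set([w for w in query_words if w[:4] in tags])
--
--     to_untag = kb_elems_qry - kb_elems_qst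
--
--     if len(to_untag) > 0:
--         for i in range(len(query_words)):
--             if query_words[i] in to_untag:
--                 query_words[i] = query_words[i].replace(':', '_')
--
--     return ' '.join(query_words), to_untag
-- ===== SOURCE B (Python) =====
-- def untag_entry(question, query):
--     tags = ['dbr:', 'dbo:', 'dbp:', 'dbc:']
--     kb_elems_qst = {w for w in question.split() if w[:4] in tags}
--     out_words = []
--     to_untag = set()
--     for w in query.split():
--         if w[:4] in tags and w not in kb_elems_qst:
--             to_untag.add(w)
--             out_words.append(w.replace(':', '_'))
--         else:
--             out_words.append(w)
--     return ' '.join(out_words), to_untag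
-- ===== Notes on version B (the rewrite author's own statement) =====
-- stated objective: simpler
-- what changed: B drops the query-side set and the set difference: it builds only the question-side tag set and makes one fused pass over the query words that simultaneously collects to_untag and rewrites ':' to '_', instead of A's two-phase detect-then-rewrite with an extra set and a difference.
import Mathlib
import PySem

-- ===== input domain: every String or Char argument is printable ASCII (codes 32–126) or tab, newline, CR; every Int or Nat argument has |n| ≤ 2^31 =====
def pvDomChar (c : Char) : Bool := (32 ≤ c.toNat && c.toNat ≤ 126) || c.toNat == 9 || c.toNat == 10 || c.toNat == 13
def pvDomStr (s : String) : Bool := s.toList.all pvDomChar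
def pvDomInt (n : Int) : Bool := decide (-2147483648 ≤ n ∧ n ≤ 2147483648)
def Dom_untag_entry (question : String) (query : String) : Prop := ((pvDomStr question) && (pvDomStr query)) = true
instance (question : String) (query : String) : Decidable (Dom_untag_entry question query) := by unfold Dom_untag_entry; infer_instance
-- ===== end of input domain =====

-- B fuses A's two-phase detect-then-rewrite (query-side set, set difference, index loop) into a
-- single traversal of the query words; objective: a simpler decomposition at the same cost.


-- shared constant: tags = ['dbr:', 'dbo:', 'dbp:', 'dbc:']
def untagTags : List String := ["dbr:", "dbo:", "dbp:", "dbc:"]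

-- w[:4] in tags
def untagIsKB (w : String) : Bool := untagTags.contains (PySem.Str.slice w none (some 4))

-- ===== PORT A =====
def untag_entry (question : String) (query : String) : String × List String :=
  let question_words := PySem.Str.split₀ question
  let query_words := PySem.Str.split₀ query
  let kb_elems_qst : PySem.Set String :=
    PySem.Set.ofList (question_words.filter (fun w => untagIsKB w))
  let kb_elems_qry : PySem.Set String :=
    PySem.Set.ofList (query_words.filter (fun w => untagIsKB w))
  let to_untag : PySem.Set String := PySem.Set.diff kb_elems_qry kb_elems_qst
  let query_words2 :=
    if 0 < PySem.Set.len to_untag then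
      -- for i in range(len(query_words)): if query_words[i] in to_untag: query_words[i] = query_words[i].replace(':', '_')
      (PySem.List.pyRange 0 (query_words.length : Int) 1).foldl
        (fun cur i =>
          if PySem.Set.contains to_untag (PySem.List.pyGetD cur i "") then
            PySem.List.pySetD cur i (PySem.Str.replace (PySem.List.pyGetD cur i "") ":" "_")
          else cur)
        query_words
    else query_words
  (PySem.Str.join " " query_words2, to_untag)

-- ===== PORT B =====
def untag_entry_alt (question : String) (query : String) : String × List String :=
  let kb_elems_qst : PySem.Set String :=
    PySem.Set.ofList ((PySem.Str.split₀ question).filter (fun w => untagIsKB w))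
  let st :=
    (PySem.Str.split₀ query).foldl
      (fun (st : List String × PySem.Set String) w =>
        if untagIsKB w && !(PySem.Set.contains kb_elems_qst w) then
          (st.1 ++ [PySem.Str.replace w ":" "_"], PySem.Set.add st.2 w)
        else
          (st.1 ++ [w], st.2))
      ([], PySem.Set.empty)
  (PySem.Str.join " " st.1, st.2)

-- ===== PRECONDITION & SPEC =====
def Spec_untag_entry (question : String) (query : String) (out : String × List String) : Prop := out = untag_entry_alt question query
instance (question : String) (query : String) (out : String × List String) : Decidable (Spec_untag_entry question query out) := by unfold Spec_untag_entry; infer_instance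

-- ===== CLAIM (what is proved, stated in full; the proofs are below) =====
def Claim_equal_untag_entry : Prop := ∀ (question : String) (query : String), Dom_untag_entry question query → Spec_untag_entry question query (untag_entry question query)

-- ===== LEMMAS AND PROOFS =====

-- A's index loop over the list is the pointwise rewrite of each word not yet processed.
theorem untag_loop_eq_map (pb : String → Bool) (f : String → String) :
    ∀ (suf pre : List String),
      (PySem.List.pyRange (pre.length : Int) ((pre.length : Int) + (suf.length : Int)) 1).foldl
        (fun cur i =>
          if pb (PySem.List.pyGetD cur i "") then
            PySem.List.pySetD cur i (f (PySem.List.pyGetD cur i ""))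
          else cur)
        (pre ++ suf)
      = pre ++ suf.map (fun w => if pb w then f w else w) := by
  intro suf
  induction suf with
  | nil =>
    intro pre
    rw [PySem.List.pyRange_one_eq_nil (by simp)]
    simp
  | cons w rest ih =>
    intro pre
    rw [PySem.List.pyRange_one_cons (by simp), List.foldl_cons]
    have hget : PySem.List.pyGetD (pre ++ w :: rest) (pre.length : Int) "" = w := by
      rw [PySem.List.pyGetD_natCast]
      simp
    rw [hget]
    cases hp : pb w
    · rw [if_neg (by simp)]
      have hsplit : pre ++ w :: rest = (pre ++ [w]) ++ rest := by simp
      have e1 : (pre.length : Int) + 1 = ((pre ++ [w]).length : Int) := by simp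
      have e2 : (pre.length : Int) + ((w :: rest).length : Int) = ((pre ++ [w]).length : Int) + (rest.length : Int) := by
        simp; omega
      rw [hsplit, e2, e1, ih (pre ++ [w])]
      simp [hp]
    · rw [if_pos rfl]
      have hset : PySem.List.pySetD (pre ++ w :: rest) (pre.length : Int) (f w) = (pre ++ [f w]) ++ rest := by
        rw [PySem.List.pySetD_natCast]
        simp
      have e1 : (pre.length : Int) + 1 = ((pre ++ [f w]).length : Int) := by simp
      have e2 : (pre.length : Int) + ((w :: rest).length : Int) = ((pre ++ [f w]).length : Int) + (rest.length : Int) := by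
        simp; omega
      rw [hset, e2, e1, ih (pre ++ [f w])]
      simp [hp]

-- the whole-list instance of the loop lemma (pre = [])
theorem untag_loop_eq_map0 (pb : String → Bool) (f : String → String) (l : List String) :
    (PySem.List.pyRange 0 (l.length : Int) 1).foldl
      (fun cur i =>
        if pb (PySem.List.pyGetD cur i "") then
          PySem.List.pySetD cur i (f (PySem.List.pyGetD cur i ""))
        else cur) l
    = l.map (fun w => if pb w then f w else w) := by
  have h := untag_loop_eq_map pb f l []
  simpa using h

-- set(...) commutes with a filter (first-occurrence order is preserved)
theorem untag_filter_ofList (q : String → Bool) (l : List String) :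
    (PySem.Set.ofList l).filter q = PySem.Set.ofList (l.filter q) := by
  induction l using List.reverseRecOn with
  | nil => rfl
  | append_singleton l x ih =>
    rw [PySem.Set.ofList_append_singleton, List.filter_append]
    cases hq : q x
    · have : List.filter q [x] = [] := by simp [hq]
      rw [this, List.append_nil, ← ih]
      unfold PySem.Set.add
      cases hc : (PySem.Set.ofList l).contains x
      · rw [if_neg (by simp), List.filter_append]
        simp [hq]
      · rw [if_pos rfl]
    · have : List.filter q [x] = [x] := by simp [hq]
      rw [this, PySem.Set.ofList_append_singleton, ← ih]
      unfold PySem.Set.add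
      cases hc : (PySem.Set.ofList l).contains x
      · rw [if_neg (by simp), if_neg ?_, List.filter_append]
        · simp [hq]
        · simp only [PySem.Set.contains_eq_listContains] at hc ⊢
          simp only [List.contains_eq_mem] at hc ⊢
          simp [List.mem_filter]
          intro hm
          simp [hm] at hc
      · rw [if_pos rfl, if_pos ?_]
        simp only [PySem.Set.contains_eq_listContains, List.contains_eq_mem] at hc ⊢
        simp at hc ⊢
        exact ⟨hc, hq⟩

-- B's fused fold, split into its two components
theorem untag_bfold (qs : PySem.Set String) :
    ∀ (l : List String) (acc : List String) (s : PySem.Set String),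
      l.foldl
        (fun (st : List String × PySem.Set String) w =>
          if untagIsKB w && !(PySem.Set.contains qs w) then
            (st.1 ++ [PySem.Str.replace w ":" "_"], PySem.Set.add st.2 w)
          else
            (st.1 ++ [w], st.2))
        (acc, s)
      = (acc ++ l.map (fun w => if untagIsKB w && !(PySem.Set.contains qs w) then PySem.Str.replace w ":" "_" else w),
         (l.filter (fun w => untagIsKB w && !(PySem.Set.contains qs w))).foldl PySem.Set.add s) := by
  intro l
  induction l with
  | nil => intro acc s; simp
  | cons w rest ih =>
    intro acc s
    rw [List.foldl_cons, List.filter_cons, List.map_cons]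
    cases h : untagIsKB w && !(PySem.Set.contains qs w)
    · rw [if_neg (by simp), if_neg (by simp), if_neg (by simp), ih]
      simp
    · rw [if_pos rfl, if_pos rfl, if_pos rfl, List.foldl_cons, ih]
      simp

-- membership in A's to_untag set, for words of the query
theorem untag_contains_ofList_filter (p : String → Bool) (l : List String) (w : String) (hwl : w ∈ l) :
    PySem.Set.contains (PySem.Set.ofList (List.filter p l)) w = p w := by
  by_cases hm : w ∈ List.filter p l
  · rw [(List.mem_filter.mp hm).2]
    exact (PySem.Set.contains_iff _ _).mpr ((PySem.Set.mem_ofList _ _).mpr hm)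
  · have hp : p w = false := by
      cases hpw : p w
      · rfl
      · exact absurd (List.mem_filter.mpr ⟨hwl, hpw⟩) hm
    rw [hp]
    cases hc : PySem.Set.contains (PySem.Set.ofList (List.filter p l)) w
    · rfl
    · exact absurd ((PySem.Set.mem_ofList _ _).mp ((PySem.Set.contains_iff _ _).mp hc)) hm

-- ===== VERDICT (by name: the statement is the Claim_ definition above) =====
theorem untag_entry_spec : Claim_equal_untag_entry := by
  intro question query _
  unfold Spec_untag_entry untag_entry untag_entry_alt
  simp only []
  rw [untag_bfold]
  set l := PySem.Str.split₀ query with hl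
  set Q := PySem.Set.ofList ((PySem.Str.split₀ question).filter (fun w => untagIsKB w)) with hQ
  set p : String → Bool := fun w => untagIsKB w && !(PySem.Set.contains Q w) with hp
  have hto : PySem.Set.diff (PySem.Set.ofList (l.filter (fun w => untagIsKB w))) Q
      = PySem.Set.ofList (l.filter p) := by
    unfold PySem.Set.diff
    rw [untag_filter_ofList, List.filter_filter]
    congr 1
    apply List.filter_congr
    intro a _
    rw [hp]
    exact Bool.and_comm _ _
  rw [hto]
  have hb : (l.filter p).foldl PySem.Set.add PySem.Set.empty = PySem.Set.ofList (l.filter p) := rfl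
  rw [hb]
  congr 1
  by_cases hne : l.filter p = []
  · rw [if_neg (by simp [hne, PySem.Set.len])]
    congr 1
    have hall : ∀ w ∈ l, p w = false := by
      intro w hw
      cases hpw : p w
      · rfl
      · exact absurd (List.mem_filter.mpr ⟨hw, hpw⟩) (by simp [hne])
    calc l = l.map id := by simp
      _ = l.map (fun w => if p w then PySem.Str.replace w ":" "_" else w) := by
          apply List.map_congr_left
          intro a ha
          simp [hall a ha]
  · have hpos : 0 < PySem.Set.len (PySem.Set.ofList (l.filter p)) := by
      obtain ⟨w, hw⟩ := List.exists_mem_of_ne_nil _ hne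
      have hmem : w ∈ PySem.Set.ofList (l.filter p) := (PySem.Set.mem_ofList _ _).mpr hw
      simpa [PySem.Set.len] using List.length_pos_of_mem hmem
    rw [if_pos hpos, untag_loop_eq_map0 (fun w => PySem.Set.contains (PySem.Set.ofList (List.filter p l)) w) (fun w => PySem.Str.replace w ":" "_") l, List.nil_append]
    refine congrArg (PySem.Str.join " ") ?_
    apply List.map_congr_left
    intro a ha
    rw [untag_contains_ofList_filter p l a ha]
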